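-- pv_equiv track=rewrite | github.com/TheSixthBrigade/radiant-realm-project | whitelisting_service/new_obfuscator/transforms/dead_code.py | _inject_blocks_into_code
-- ===== SOURCE A (Python) =====
-- from typing import List, Dict, Tuple, Optional
--
-- def _inject_blocks_into_code(code: str, blocks: List[str]) -> str:
--     """
--     Inject dead code blocks at strategic positions in the code.
--
--     Args:
--         code: Original code
--         blocks: List of dead code blocks to inject
--
--     Returns:
--         Code with blocks injected
--     """
--     lines = code.split('\n')
--
--     if len(lines) < len(blocks):
--         # If code is too short, prepend all blocks
--         return '\n'.join(blocks) + '\n' + code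
--
--     # Calculate injection positions (spread throughout code)
--     positions = []
--     chunk_size = len(lines) // (len(blocks) + 1)
--
--     for i in range(len(blocks)):
--         pos = (i + 1) * chunk_size
--         pos = min(pos, len(lines) - 1)
--         positions.append(pos)
--
--     # Sort positions in reverse to avoid index shifting
--     positions.sort(reverse=True)
--
--     # Inject blocks
--     for i, pos in enumerate(positions):
--         block_idx = len(blocks) - 1 - i
--         if block_idx < len(blocks):
--             lines.insert(pos, blocks[block_idx])
--
--     return '\n'.join(lines)
-- ===== SOURCE B (Python) =====
-- def _inject_blocks_into_code(code, blocks):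
--     lines = code.split('\n')
--     if len(lines) < len(blocks):
--         return '\n'.join(blocks) + '\n' + code
--     chunk_size = len(lines) // (len(blocks) + 1)
--     buckets = {}
--     for i, block in enumerate(blocks):
--         pos = min((i + 1) * chunk_size, len(lines) - 1)
--         buckets[pos] = buckets.get(pos, []) + [block]
--     out = []
--     for idx, line in enumerate(lines):
--         out += buckets.get(idx, []) + [line]
--     return '\n'.join(out)
-- ===== Notes on version B (the rewrite author's own statement) =====
-- stated objective: simpler
-- what changed: Replaces A's reverse-sort of the injection positions followed by repeated list.insert with a dict bucketing each position to its blocks and a single forward pass that emits buckets before their lines.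
import Mathlib
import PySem

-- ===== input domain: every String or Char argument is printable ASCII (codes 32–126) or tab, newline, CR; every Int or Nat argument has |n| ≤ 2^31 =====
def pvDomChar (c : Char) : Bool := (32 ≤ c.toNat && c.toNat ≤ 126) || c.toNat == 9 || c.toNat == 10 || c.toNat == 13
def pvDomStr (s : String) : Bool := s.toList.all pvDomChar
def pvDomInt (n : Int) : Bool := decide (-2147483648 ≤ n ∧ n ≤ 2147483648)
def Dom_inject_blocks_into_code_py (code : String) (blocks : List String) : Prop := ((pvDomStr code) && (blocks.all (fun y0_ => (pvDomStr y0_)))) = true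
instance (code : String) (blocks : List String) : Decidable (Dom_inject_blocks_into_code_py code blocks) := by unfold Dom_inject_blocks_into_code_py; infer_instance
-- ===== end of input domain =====

-- B replaces A's reverse-sort-and-insert with one bucket dict plus a single forward pass (simpler decomposition); same return value everywhere.


-- ===== PORT A =====
-- code.split('\n'): sep is the non-empty literal "\n", so split? is always some (.getD [] is never taken)
def inject_blocks_into_code_py (code : String) (blocks : List String) : String :=
  let lines := (PySem.Str.split? code "\n").getD []
  if lines.length < blocks.length then
    PySem.Str.join "\n" blocks ++ "\n" ++ code
  else
    let chunk : Int := PySem.Int.floordiv (lines.length : Int) ((blocks.length : Int) + 1)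
    let positions : List Int :=
      (PySem.List.pyRange 0 (blocks.length : Int) 1).foldl
        (fun acc i => acc ++ [min ((i + 1) * chunk) ((lines.length : Int) - 1)]) []
    let positions := PySem.List.sorted positions (fun x => x) true
    let lines2 :=
      (PySem.List.enumerate positions).foldl
        (fun ls p =>
          let block_idx : Int := (blocks.length : Int) - 1 - p.1
          if block_idx < (blocks.length : Int) then
            PySem.List.insert ls p.2 (PySem.List.pyGetD blocks block_idx "")
          else ls) lines
    PySem.Str.join "\n" lines2

-- ===== PORT B =====
def inject_blocks_into_code_py_alt (code : String) (blocks : List String) : String :=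
  let lines := (PySem.Str.split? code "\n").getD []
  if lines.length < blocks.length then
    PySem.Str.join "\n" blocks ++ "\n" ++ code
  else
    let chunk : Int := PySem.Int.floordiv (lines.length : Int) ((blocks.length : Int) + 1)
    let buckets : PySem.Dict Int (List String) :=
      (PySem.List.enumerate blocks).foldl
        (fun d p => d.modify (min ((p.1 + 1) * chunk) ((lines.length : Int) - 1)) [] (· ++ [p.2]))
        PySem.Dict.empty
    let out : List String :=
      (PySem.List.enumerate lines).foldl
        (fun acc p => acc ++ buckets.getD p.1 [] ++ [p.2]) []
    PySem.Str.join "\n" out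

-- ===== PRECONDITION & SPEC =====
def Spec_inject_blocks_into_code_py (code : String) (blocks : List String) (out : String) : Prop := out = inject_blocks_into_code_py_alt code blocks
instance (code : String) (blocks : List String) (out : String) : Decidable (Spec_inject_blocks_into_code_py code blocks out) := by unfold Spec_inject_blocks_into_code_py; infer_instance

-- ===== CLAIM (what is proved, stated in full; the proofs are below) =====
def Claim_equal_inject_blocks_into_code_py : Prop := ∀ (code : String) (blocks : List String), Dom_inject_blocks_into_code_py code blocks → Spec_inject_blocks_into_code_py code blocks (inject_blocks_into_code_py code blocks)

-- ===== LEMMAS AND PROOFS =====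

-- proof-only normal form: emit, before each line of ls (at absolute index k, k+1, …),
-- the blocks of qs whose position equals that index, in qs order
def pvInterleave (ls : List String) (qs : List (Int × String)) (k : Int) : List String :=
  match ls with
  | [] => []
  | l :: t => (qs.filter (fun q => q.1 == k)).map (·.2) ++ l :: pvInterleave t qs (k + 1)

theorem pvInterleave_nil (ls : List String) (k : Int) : pvInterleave ls [] k = ls := by
  induction ls generalizing k with
  | nil => rfl
  | cons l t ih => simp [pvInterleave, ih]

theorem pvInterleave_cons_lt (ls : List String) (q : Int × String) (qs : List (Int × String))
    (k : Int) (h : q.1 < k) : pvInterleave ls (q :: qs) k = pvInterleave ls qs k := by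
  induction ls generalizing k with
  | nil => rfl
  | cons l t ih =>
    simp only [pvInterleave, List.filter_cons]
    have hne : (q.1 == k) = false := by simp; omega
    rw [hne]
    simp only [Bool.false_eq_true, if_false, ih (k + 1) (by omega)]

theorem pvInterleave_insertIdx (ls : List String) (p : Int) (b : String)
    (rest : List (Int × String)) (k : Int)
    (hrest : ∀ q ∈ rest, p ≤ q.1) (hk : k ≤ p) (hlt : p - k < (ls.length : Int)) :
    (pvInterleave ls rest k).insertIdx (p - k).toNat b = pvInterleave ls ((p, b) :: rest) k := by
  induction ls generalizing k with
  | nil => simp at hlt; omega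
  | cons l t ih =>
    by_cases hkp : k = p
    · subst hkp
      have h0 : (k - k).toNat = 0 := by omega
      rw [h0, List.insertIdx_zero]
      simp only [pvInterleave, List.filter_cons]
      have : ((k, b).1 == k) = true := by simp
      rw [this]
      have hrec : pvInterleave t ((k, b) :: rest) (k + 1) = pvInterleave t rest (k + 1) :=
        pvInterleave_cons_lt t (k, b) rest (k + 1) (by simp)
      simp [hrec]
    · have hklt : k < p := lt_of_le_of_ne hk hkp
      have hqk : ∀ q ∈ rest, ¬ (q.1 = k) := fun q hq => by have := hrest q hq; omega
      simp only [pvInterleave, List.filter_cons]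
      have h1 : ((p, b).1 == k) = false := by simp; omega
      rw [h1]
      have h2 : (rest.filter (fun q => q.1 == k)) = [] := by
        apply List.filter_eq_nil_iff.mpr
        intro q hq; simp; exact fun h => (hqk q hq) h
      rw [h2]
      have h3 : (p - k).toNat = (p - (k + 1)).toNat + 1 := by omega
      rw [h3]
      simp only [Bool.false_eq_true, if_false, List.map_nil, List.nil_append,
        List.insertIdx_succ_cons]
      rw [ih (k + 1) (by omega) (by simp only [List.length_cons] at hlt; push_cast at hlt ⊢; omega)]

theorem pvTakeDrop_insertIdx {α : Type} (l : List α) (i : Nat) (a : α) (h : i ≤ l.length) :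
    l.take i ++ a :: l.drop i = l.insertIdx i a := by
  induction l generalizing i with
  | nil =>
    simp only [List.length_nil, Nat.le_zero] at h
    subst h; simp
  | cons x t ih =>
    cases i with
    | zero => simp
    | succ j => simp [List.insertIdx_succ_cons, ih j (by simpa using h)]

theorem pvFoldrInsert_length (qs : List (Int × String)) (ls : List String) :
    (qs.foldr (fun q acc => PySem.List.insert acc q.1 q.2) ls).length
      = ls.length + qs.length := by
  induction qs with
  | nil => simp
  | cons q rest ih => simp [PySem.List.length_insert, ih]; omega

-- heart: descending-order insertion of ascending (position, block) pairs is the interleaving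
theorem pvFoldrInsert_eq_interleave (qs : List (Int × String)) (ls : List String)
    (hsorted : qs.Pairwise (fun a b => a.1 ≤ b.1))
    (hbound : ∀ q ∈ qs, 0 ≤ q.1 ∧ q.1 < (ls.length : Int)) :
    qs.foldr (fun q acc => PySem.List.insert acc q.1 q.2) ls = pvInterleave ls qs 0 := by
  induction qs with
  | nil => simpa using (pvInterleave_nil ls 0).symm
  | cons q rest ih =>
    obtain ⟨hq0, hqlt⟩ := hbound q (by simp)
    have hrest : ∀ r ∈ rest, q.1 ≤ r.1 := (List.pairwise_cons.mp hsorted).1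
    have ihres := ih (List.pairwise_cons.mp hsorted).2 (fun r hr => hbound r (by simp [hr]))
    simp only [List.foldr_cons, ihres]
    have hlen : (pvInterleave ls rest 0).length = ls.length + rest.length := by
      rw [← ihres]; exact pvFoldrInsert_length rest ls
    have hcast : q.1 = ((q.1.toNat : Nat) : Int) := by omega
    rw [hcast, PySem.List.insert_natCast _ _ _ (by rw [hlen]; omega)]
    have htake : (pvInterleave ls rest 0).take q.1.toNat ++ q.2 :: (pvInterleave ls rest 0).drop q.1.toNat
        = (pvInterleave ls rest 0).insertIdx q.1.toNat q.2 := by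
      exact pvTakeDrop_insertIdx _ _ _ (by rw [hlen]; omega)
    rw [htake]
    have := pvInterleave_insertIdx ls q.1 q.2 rest 0 hrest (by omega) (by omega)
    simpa using this

-- flatMap over enumerated lines with per-index buckets is the interleaving
theorem pvFlatMap_eq_interleave (qs : List (Int × String)) (ls : List String) (k : Int) :
    (PySem.List.enumerate ls k).flatMap
        (fun p => (qs.filter (fun q => q.1 == p.1)).map (·.2) ++ [p.2])
      = pvInterleave ls qs k := by
  induction ls generalizing k with
  | nil => rfl
  | cons l t ih =>
    rw [PySem.List.enumerate_cons]
    simp only [List.flatMap_cons, pvInterleave, ih (k + 1)]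
    simp

theorem pvRangeMapRev (n : Nat) : (List.range n).map (fun i => n - 1 - i) = (List.range n).reverse := by
  apply List.ext_getElem
  · simp
  · intro i h1 h2
    simp [List.getElem_reverse]


-- abbreviation used only in the proofs below
def pvPos (c nn : Int) (k : Int) : Int := min ((k + 1) * c) (nn - 1)

theorem pvMain (lines blocks : List String) (c : Int) (hc : 0 ≤ c)
    (hge : blocks.length ≤ lines.length) :
    (PySem.List.enumerate (PySem.List.sorted
        ((PySem.List.pyRange 0 (blocks.length : Int) 1).foldl
          (fun acc i => acc ++ [min ((i + 1) * c) ((lines.length : Int) - 1)]) [])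
        (fun x => x) true)).foldl
      (fun ls p =>
        if (blocks.length : Int) - 1 - p.1 < (blocks.length : Int) then
          PySem.List.insert ls p.2 (PySem.List.pyGetD blocks ((blocks.length : Int) - 1 - p.1) "")
        else ls) lines
    = (PySem.List.enumerate lines).foldl
        (fun acc p =>
          acc ++ ((PySem.List.enumerate blocks).foldl
              (fun d p => d.modify (min ((p.1 + 1) * c) ((lines.length : Int) - 1)) [] (· ++ [p.2]))
              PySem.Dict.empty).getD p.1 [] ++ [p.2]) [] := by
  set n : Nat := lines.length with hn
  set m : Nat := blocks.length with hm
  -- the ascending (position, block) pairs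
  set QS : List (Int × String) :=
    (List.range m).map (fun (k : Nat) => (pvPos c (n : Int) (k : Int), PySem.List.pyGetD blocks (k : Int) "")) with hQS
  have hQSlen : QS.length = m := by simp [hQS]
  have hQSget : ∀ (k : Nat) (h : k < m), QS[k]'(by omega) = (pvPos c (n : Int) (k : Int), PySem.List.pyGetD blocks (k : Int) "") := by
    intro k h; simp [hQS]
  -- Step 1: the positions list before sorting
  have hP : ((PySem.List.pyRange 0 (m : Int) 1).foldl
      (fun acc i => acc ++ [min ((i + 1) * c) ((n : Int) - 1)]) [])
      = (List.range m).map (fun (k : Nat) => pvPos c (n : Int) (k : Int)) := by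
    rw [PySem.List.foldl_append_singleton_eq_map]
    rw [PySem.List.pyRange_one]
    simp [List.map_map, pvPos, Function.comp]
  set P : List Int := (List.range m).map (fun (k : Nat) => pvPos c (n : Int) (k : Int)) with hPdef
  -- monotonicity of positions
  have hmono : ∀ (i j : Nat), i < j → pvPos c (n : Int) (i : Int) ≤ pvPos c (n : Int) (j : Int) := by
    intro i j hij
    unfold pvPos
    have : ((i : Int) + 1) * c ≤ ((j : Int) + 1) * c := by
      apply mul_le_mul_of_nonneg_right _ hc
      omega
    omega
  have hPpw : P.Pairwise (fun a b => a ≤ b) := by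
    rw [hPdef, List.pairwise_map]
    exact List.pairwise_lt_range.imp (by intro a b h; exact hmono a b h)
  -- Step 2: sorting the ascending positions in reverse is reversal
  have hsorted : PySem.List.sorted P (fun x => x) true = P.reverse := by
    exact List.Perm.eq_of_pairwise (le := fun a b : Int => b ≤ a)
      (by intro a b _ _ h1 h2; omega)
      (PySem.List.sorted_pairwise_rev P (fun x => x))
      (by rw [List.pairwise_reverse]; exact hPpw)
      ((PySem.List.sorted_perm P (fun x => x) true).trans (List.reverse_perm P).symm)
  rw [hP, hsorted]
  -- Step 3: enumerate of the reversed positions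
  have hEnum : PySem.List.enumerate P.reverse
      = (List.range m).map (fun (i : Nat) => ((i : Int), pvPos c (n : Int) ((m - 1 - i : Nat) : Int))) := by
    apply List.ext_getElem
    · simp [PySem.List.length_enumerate, hPdef]
    · intro i h1 h2
      have hi : i < m := by simpa using h2
      have hlenP : P.length = m := by simp [hPdef]
      rw [PySem.List.getElem_enumerate]
      simp only [List.getElem_map, List.getElem_range]
      rw [List.getElem_reverse]
      simp [hPdef]
  -- Step 4: the A-side loop as a foldr over QS
  have hA : (PySem.List.enumerate P.reverse).foldl
      (fun ls p =>
        if (m : Int) - 1 - p.1 < (m : Int) then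
          PySem.List.insert ls p.2 (PySem.List.pyGetD blocks ((m : Int) - 1 - p.1) "")
        else ls) lines
      = QS.foldr (fun q acc => PySem.List.insert acc q.1 q.2) lines := by
    rw [hEnum, List.foldl_map]
    rw [PySem.List.foldl_congr_mem _ _
      (fun ls (i : Nat) => PySem.List.insert ls (pvPos c (n : Int) ((m - 1 - i : Nat) : Int))
        (PySem.List.pyGetD blocks ((m - 1 - i : Nat) : Int) "")) lines ?hcongr]
    case hcongr =>
      intro acc i hi
      have him : i < m := List.mem_range.mp hi
      have hcast : (m : Int) - 1 - (i : Int) = ((m - 1 - i : Nat) : Int) := by omega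
      have hlt : ((m - 1 - i : Nat) : Int) < (m : Int) := by omega
      simp only [hcast, hlt, if_pos]
    -- reindex (m-1-i) over range m = reverse, then foldl over reverse = foldr
    have : (List.range m).foldl
        (fun ls (i : Nat) => PySem.List.insert ls (pvPos c (n : Int) ((m - 1 - i : Nat) : Int))
          (PySem.List.pyGetD blocks ((m - 1 - i : Nat) : Int) "")) lines
        = ((List.range m).map (fun i => m - 1 - i)).foldl
          (fun ls (k : Nat) => PySem.List.insert ls (pvPos c (n : Int) (k : Int))
            (PySem.List.pyGetD blocks (k : Int) "")) lines := by
      rw [List.foldl_map]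
    rw [this, pvRangeMapRev, List.foldl_reverse, hQS, List.foldr_map]
  rw [hA]
  -- Step 5: the heart — foldr insertion equals the interleaving
  have hQSpw : QS.Pairwise (fun a b => a.1 ≤ b.1) := by
    rw [hQS, List.pairwise_map]
    exact List.pairwise_lt_range.imp (by intro a b h; exact hmono a b h)
  have hQSbound : ∀ q ∈ QS, 0 ≤ q.1 ∧ q.1 < (n : Int) := by
    intro q hq
    rw [hQS, List.mem_map] at hq
    obtain ⟨k, hk, rfl⟩ := hq
    have hk' : k < m := List.mem_range.mp hk
    have hn1 : 1 ≤ n := by omega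
    constructor
    · simp only [pvPos]
      have : 0 ≤ ((k : Int) + 1) * c := mul_nonneg (by omega) hc
      omega
    · simp only [pvPos]; omega
  rw [pvFoldrInsert_eq_interleave QS lines hQSpw (by exact hQSbound)]
  -- Step 6: the B-side loop as a flatMap with per-index buckets
  have hbuckets : ∀ (idx : Int),
      ((PySem.List.enumerate blocks).foldl
        (fun d p => d.modify (min ((p.1 + 1) * c) ((n : Int) - 1)) [] (· ++ [p.2]))
        PySem.Dict.empty).getD idx []
      = (QS.filter (fun q => q.1 == idx)).map (·.2) := by
    intro idx
    have hmap : (PySem.List.enumerate blocks).foldl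
        (fun d p => d.modify (min ((p.1 + 1) * c) ((n : Int) - 1)) [] (· ++ [p.2]))
        PySem.Dict.empty
        = ((PySem.List.enumerate blocks).map
            (fun p => (min ((p.1 + 1) * c) ((n : Int) - 1), p.2))).foldl
          (fun d p => d.modify p.1 [] (· ++ [p.2])) PySem.Dict.empty := by
      rw [List.foldl_map]
    rw [hmap, PySem.Dict.getD_foldl_modify_append]
    rw [PySem.Dict.getD_empty, List.nil_append]
    congr 1
    congr 1
    -- the mapped enumerate equals QS
    apply List.ext_getElem
    · simp [PySem.List.length_enumerate, hQSlen, hm]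
    · intro i h1 h2
      have hi : i < m := by
        simp only [List.length_map, PySem.List.length_enumerate] at h1
        omega
      simp only [List.getElem_map]
      rw [PySem.List.getElem_enumerate]
      rw [hQSget i hi]
      have : PySem.List.pyGetD blocks ((i : Nat) : Int) "" = blocks[i]'(by omega) := by
        rw [PySem.List.pyGetD_natCast]
        exact List.getD_eq_getElem blocks "" (by omega)
      simp [pvPos, this]
  have hB : (PySem.List.enumerate lines).foldl
      (fun acc p =>
        acc ++ ((PySem.List.enumerate blocks).foldl
            (fun d p => d.modify (min ((p.1 + 1) * c) ((n : Int) - 1)) [] (· ++ [p.2]))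
            PySem.Dict.empty).getD p.1 [] ++ [p.2]) []
      = (PySem.List.enumerate lines).flatMap
          (fun p => (QS.filter (fun q => q.1 == p.1)).map (·.2) ++ [p.2]) := by
    have hfun : (fun (acc : List String) (p : Int × String) =>
        acc ++ ((PySem.List.enumerate blocks).foldl
            (fun d p => d.modify (min ((p.1 + 1) * c) ((n : Int) - 1)) [] (· ++ [p.2]))
            PySem.Dict.empty).getD p.1 [] ++ [p.2])
        = (fun acc p => acc ++ ((QS.filter (fun q => q.1 == p.1)).map (·.2) ++ [p.2])) := by
      funext acc p
      rw [hbuckets p.1, List.append_assoc]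
    rw [hfun, PySem.List.foldl_append_eq_flatMap, List.nil_append]
  rw [hB, pvFlatMap_eq_interleave]

-- ===== VERDICT (by name: the statement is the Claim_ definition above) =====
theorem inject_blocks_into_code_py_spec : Claim_equal_inject_blocks_into_code_py := by
  intro code blocks _
  unfold Spec_inject_blocks_into_code_py inject_blocks_into_code_py inject_blocks_into_code_py_alt
  set lines := (PySem.Str.split? code "\n").getD [] with hlines
  by_cases hshort : lines.length < blocks.length
  · simp [hshort]
  · simp only [hshort, if_false]
    set c : Int := PySem.Int.floordiv (lines.length : Int) ((blocks.length : Int) + 1) with hc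
    have hc0 : 0 ≤ c := by
      rw [hc]
      have : ((blocks.length : Int) + 1) = ((blocks.length + 1 : Nat) : Int) := by push_cast; ring
      rw [this, PySem.Int.floordiv_natCast]
      positivity
    exact congrArg (PySem.Str.join "\n") (pvMain lines blocks c hc0 (by omega))
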